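-- pv_equiv track=rewrite | github.com/bsabio/IS421_prototype | newsroom/ai_toolkit.py | _fallback_longform_article
-- ===== SOURCE A (Python) =====
-- from typing import Dict, List, Any
--
-- def _word_count(text: str) -> int:
--     return len([w for w in (text or '').split() if w.strip()])
--
-- def _fallback_longform_article(article: Dict[str, str], min_words: int, max_words: int) -> str:
--     headline = article.get("headline", "This Story")
--     dek = article.get("dek", "")
--     summary = article.get("summary", "")
--     section = article.get("sectionLabel", "News")
--     source = article.get("sourceUrl", "")
--     base_body = article.get("body", "")
--
--     seed_points = [part.strip() for part in base_body.split("\n\n") if part.strip()]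
--     if not seed_points and summary:
--         seed_points = [summary]
--
--     paragraphs: List[str] = []
--     paragraphs.append(
--         f"{headline} sits at the center of this week’s {section.lower()} conversation, and the details point to a bigger shift that readers should pay attention to now. "
--         f"{dek} The available reporting indicates this is not an isolated update, but part of an ongoing pattern that is shaping decisions across founders, operators, and investors."
--     )
--
--     for point in seed_points[:3]:
--         paragraphs.append(
--             f"At the core of the story is a concrete update: {point} That development matters because it changes what stakeholders can realistically plan for in the near term. "
--             f"When similar milestones appear in a short window, they often influence hiring, product velocity, and partnership timing across the broader ecosystem."
--         )
--
--     paragraphs.append(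
--         "From an execution standpoint, this moment highlights a familiar newsroom theme: momentum is rarely created by a single announcement. "
--         "It is usually the result of months of operational choices, customer validation, and resource allocation that finally become visible in one public update. "
--         "For readers tracking outcomes rather than headlines, the key question is whether the organization can translate this moment into consistent follow-through over the next two quarters."
--     )
--
--     paragraphs.append(
--         "The practical implications are straightforward. Teams in the same category will likely benchmark against this development, and market participants will adjust expectations in response. "
--         "That can create secondary effects: faster competitive cycles, tighter performance standards, and stronger pressure to show measurable progress. "
--         "In that environment, clarity around milestones and execution quality becomes more important than broad claims."
--     )
--
--     paragraphs.append(
--         "For newsletter readers, the takeaway is to treat this as a directional signal rather than a final verdict. "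
--         "The immediate update is important, but the next stage is where real value is proven: product adoption, operational discipline, and sustained delivery. "
--         "If those indicators trend in the right direction, this story can become a reference point for what disciplined growth looks like in the current cycle."
--     )
--
--     if source:
--         paragraphs.append(
--             f"Source note: this article is grounded in the linked source material ({source}) and the structured newsletter summary. "
--             "It focuses on expanding readability and context while preserving the original facts, names, and figures available in the input."
--         )
--
--     text = "\n\n".join(paragraphs)
--     while _word_count(text) < min_words:
--         text += (
--             "\n\nIn context, the most useful way to read this update is to watch what happens next: whether commitments are met, whether timelines hold, "
--             "and whether outcomes remain consistent as attention shifts from announcement to execution."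
--         )
--
--     words = text.split()
--     if len(words) > max_words:
--         text = " ".join(words[:max_words]).rstrip() + "..."
--
--     return text
-- ===== SOURCE B (Python) =====
-- from typing import Dict
--
-- _FILLER = (
--     "\n\nIn context, the most useful way to read this update is to watch what happens next: whether commitments are met, whether timelines hold, "
--     "and whether outcomes remain consistent as attention shifts from announcement to execution."
-- )
--
--
-- def _fallback_longform_article(article: Dict[str, str], min_words: int, max_words: int) -> str:
--     headline = article.get("headline", "This Story")
--     dek = article.get("dek", "")
--     summary = article.get("summary", "")
--     section = article.get("sectionLabel", "News")
--     source = article.get("sourceUrl", "")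
--     base_body = article.get("body", "")
--
--     seed_points = [part.strip() for part in base_body.split("\n\n") if part.strip()]
--     if not seed_points and summary:
--         seed_points = [summary]
--
--     paragraphs = (
--         [
--             f"{headline} sits at the center of this week’s {section.lower()} conversation, and the details point to a bigger shift that readers should pay attention to now. "
--             f"{dek} The available reporting indicates this is not an isolated update, but part of an ongoing pattern that is shaping decisions across founders, operators, and investors."
--         ]
--         + [
--             f"At the core of the story is a concrete update: {point} That development matters because it changes what stakeholders can realistically plan for in the near term. "
--             f"When similar milestones appear in a short window, they often influence hiring, product velocity, and partnership timing across the broader ecosystem."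
--             for point in seed_points[:3]
--         ]
--         + [
--             "From an execution standpoint, this moment highlights a familiar newsroom theme: momentum is rarely created by a single announcement. "
--             "It is usually the result of months of operational choices, customer validation, and resource allocation that finally become visible in one public update. "
--             "For readers tracking outcomes rather than headlines, the key question is whether the organization can translate this moment into consistent follow-through over the next two quarters.",
--             "The practical implications are straightforward. Teams in the same category will likely benchmark against this development, and market participants will adjust expectations in response. "
--             "That can create secondary effects: faster competitive cycles, tighter performance standards, and stronger pressure to show measurable progress. "
--             "In that environment, clarity around milestones and execution quality becomes more important than broad claims.",
--             "For newsletter readers, the takeaway is to treat this as a directional signal rather than a final verdict. "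
--             "The immediate update is important, but the next stage is where real value is proven: product adoption, operational discipline, and sustained delivery. "
--             "If those indicators trend in the right direction, this story can become a reference point for what disciplined growth looks like in the current cycle.",
--         ]
--         + (
--             [
--                 f"Source note: this article is grounded in the linked source material ({source}) and the structured newsletter summary. "
--                 "It focuses on expanding readability and context while preserving the original facts, names, and figures available in the input."
--             ]
--             if source
--             else []
--         )
--     )
--
--     text = "\n\n".join(paragraphs)
--
--     # pad arithmetically: one division instead of rescanning the whole text each loop
--     wc = len(text.split())
--     if wc < min_words:
--         fill_wc = len(_FILLER.split())
--         n = -(-(min_words - wc) // fill_wc)  # ceiling division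
--         text += _FILLER * n
--
--     words = text.split()
--     if len(words) > max_words:
--         text = " ".join(words[:max_words]) + "..."
--
--     return text
-- ===== Notes on version B (the rewrite author's own statement) =====
-- stated objective: faster
-- what changed: A pads by re-splitting the entire growing text to recount its words on every loop pass; B counts words once and computes the exact number of filler blocks with a single ceiling division, appending them all at once (and drops A's no-op rstrip on the space-joined truncation).
import Mathlib
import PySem

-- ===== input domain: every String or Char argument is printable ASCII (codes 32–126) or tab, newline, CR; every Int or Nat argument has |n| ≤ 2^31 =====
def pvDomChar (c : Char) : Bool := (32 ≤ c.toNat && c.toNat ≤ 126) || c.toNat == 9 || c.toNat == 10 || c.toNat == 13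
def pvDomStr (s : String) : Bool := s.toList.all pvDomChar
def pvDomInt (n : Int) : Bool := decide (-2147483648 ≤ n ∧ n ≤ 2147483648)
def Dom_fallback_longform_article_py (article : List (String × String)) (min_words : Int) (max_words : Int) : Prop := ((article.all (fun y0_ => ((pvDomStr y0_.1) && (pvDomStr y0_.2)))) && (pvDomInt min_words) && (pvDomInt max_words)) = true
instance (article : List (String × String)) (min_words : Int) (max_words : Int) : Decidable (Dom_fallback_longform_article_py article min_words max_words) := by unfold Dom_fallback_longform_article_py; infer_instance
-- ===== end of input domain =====

-- B replaces A's quadratic padding loop (rescan the whole text's word count each pass) by one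
-- word count plus a ceiling division that computes the number of filler blocks directly: faster.

-- ----- shared template data and Python-identical fragments of both sources -----

-- Python string concatenation (s + t), kernel-transparent
def pvCat (a b : String) : String := String.ofList (a.toList ++ b.toList)

def pvFiller : String := "\n\nIn context, the most useful way to read this update is to watch what happens next: whether commitments are met, whether timelines hold, and whether outcomes remain consistent as attention shifts from announcement to execution."

def pvPara1 (headline sectionLabel dek : String) : String :=
  pvCat (pvCat (pvCat (pvCat (pvCat headline " sits at the center of this week’s ") (PySem.Str.lower sectionLabel)) " conversation, and the details point to a bigger shift that readers should pay attention to now. ") dek) " The available reporting indicates this is not an isolated update, but part of an ongoing pattern that is shaping decisions across founders, operators, and investors."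

def pvParaSeed (point : String) : String :=
  pvCat (pvCat "At the core of the story is a concrete update: " point) " That development matters because it changes what stakeholders can realistically plan for in the near term. When similar milestones appear in a short window, they often influence hiring, product velocity, and partnership timing across the broader ecosystem."

def pvPara2 : String := "From an execution standpoint, this moment highlights a familiar newsroom theme: momentum is rarely created by a single announcement. It is usually the result of months of operational choices, customer validation, and resource allocation that finally become visible in one public update. For readers tracking outcomes rather than headlines, the key question is whether the organization can translate this moment into consistent follow-through over the next two quarters."

def pvPara3 : String := "The practical implications are straightforward. Teams in the same category will likely benchmark against this development, and market participants will adjust expectations in response. That can create secondary effects: faster competitive cycles, tighter performance standards, and stronger pressure to show measurable progress. In that environment, clarity around milestones and execution quality becomes more important than broad claims."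

def pvPara4 : String := "For newsletter readers, the takeaway is to treat this as a directional signal rather than a final verdict. The immediate update is important, but the next stage is where real value is proven: product adoption, operational discipline, and sustained delivery. If those indicators trend in the right direction, this story can become a reference point for what disciplined growth looks like in the current cycle."

def pvParaSrc (source : String) : String :=
  pvCat (pvCat "Source note: this article is grounded in the linked source material (" source) ") and the structured newsletter summary. It focuses on expanding readability and context while preserving the original facts, names, and figures available in the input."

-- the six article.get(...) lines, identical in both sources
def pvFields (article : List (String × String)) : String × String × String × String × String × String :=
  let d := PySem.Dict.mk article
  (d.getD "headline" "This Story", d.getD "dek" "", d.getD "summary" "",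
   d.getD "sectionLabel" "News", d.getD "sourceUrl" "", d.getD "body" "")

-- seed_points comprehension + fallback, identical in both sources ('\n\n' ≠ "" so split? never raises)
def pvSeedPoints (base_body summary : String) : List String :=
  let pts := (((PySem.Str.split? base_body "\n\n").getD []).filter
      (fun p => !(PySem.Str.strip p == ""))).map (fun p => PySem.Str.strip p)
  if pts = [] ∧ ¬ summary = "" then [summary] else pts

-- ===== PORT A =====

-- A's _word_count helper
def pvWordCountA (text : String) : Int :=
  ((PySem.Str.split₀ (if text = "" then "" else text)).filter
      (fun w => !(PySem.Str.strip w == ""))).length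

-- A's while-loop; the fuel argument only makes it structural (each pass appends the filler's
-- 35 words, so min_words.toNat + 1 passes always reach the guard)
def pvLoopA : Nat → String → Int → String
  | 0, text, _ => text
  | fuel+1, text, mn =>
      if pvWordCountA text < mn then pvLoopA fuel (pvCat text pvFiller) mn else text

def fallback_longform_article_py (article : List (String × String)) (min_words : Int) (max_words : Int) : String :=
  match pvFields article with
  | (headline, dek, summary, sectionLabel, source, base_body) =>
    let seed_points := pvSeedPoints base_body summary
    let paragraphs : List String := [pvPara1 headline sectionLabel dek]
    let paragraphs := (PySem.List.slice seed_points none (some 3)).foldl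
        (fun acc point => acc ++ [pvParaSeed point]) paragraphs
    let paragraphs := paragraphs ++ [pvPara2]
    let paragraphs := paragraphs ++ [pvPara3]
    let paragraphs := paragraphs ++ [pvPara4]
    let paragraphs := if ¬ source = "" then paragraphs ++ [pvParaSrc source] else paragraphs
    let text := PySem.Str.join "\n\n" paragraphs
    let text := pvLoopA (min_words.toNat + 1) text min_words
    let words := PySem.Str.split₀ text
    if (words.length : Int) > max_words then
      pvCat (PySem.Str.rstrip (PySem.Str.join " " (PySem.List.slice words none (some max_words)))) "..."
    else text

-- ===== PORT B =====

-- Python's _FILLER * n (empty for n ≤ 0, exactly as in Python)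
def pvRepeat (s : String) (n : Int) : String :=
  String.ofList (List.flatten (List.replicate n.toNat s.toList))

def fallback_longform_article_py_alt (article : List (String × String)) (min_words : Int) (max_words : Int) : String :=
  match pvFields article with
  | (headline, dek, summary, sectionLabel, source, base_body) =>
    let seed_points := pvSeedPoints base_body summary
    let paragraphs : List String :=
      [pvPara1 headline sectionLabel dek]
      ++ (PySem.List.slice seed_points none (some 3)).map pvParaSeed
      ++ [pvPara2, pvPara3, pvPara4]
      ++ (if ¬ source = "" then [pvParaSrc source] else [])
    let text := PySem.Str.join "\n\n" paragraphs
    let wc : Int := (PySem.Str.split₀ text).length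
    let text :=
      if wc < min_words then
        let fill_wc : Int := (PySem.Str.split₀ pvFiller).length
        pvCat text (pvRepeat pvFiller (-(PySem.Int.floordiv (-(min_words - wc)) fill_wc)))
      else text
    let words := PySem.Str.split₀ text
    if (words.length : Int) > max_words then
      pvCat (PySem.Str.join " " (PySem.List.slice words none (some max_words))) "..."
    else text

-- ===== PRECONDITION & SPEC =====
def Spec_fallback_longform_article_py (article : List (String × String)) (min_words : Int) (max_words : Int) (out : String) : Prop := out = fallback_longform_article_py_alt article min_words max_words
instance (article : List (String × String)) (min_words : Int) (max_words : Int) (out : String) : Decidable (Spec_fallback_longform_article_py article min_words max_words out) := by unfold Spec_fallback_longform_article_py; infer_instance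

-- ===== CLAIM (what is proved, stated in full; the proofs are below) =====
def Claim_equal_fallback_longform_article_py : Prop := ∀ (article : List (String × String)) (min_words : Int) (max_words : Int), Dom_fallback_longform_article_py article min_words max_words → Spec_fallback_longform_article_py article min_words max_words (fallback_longform_article_py article min_words max_words)

-- ===== LEMMAS AND PROOFS =====

theorem pv_dropWhile_all_false {α : Type} (p : α → Bool) (l : List α)
    (h : ∀ x ∈ l, p x = false) : l.dropWhile p = l := by
  cases l with
  | nil => rfl
  | cons a t => simp [h a (by simp)]

-- the accumulator of split₀.go only gets prepended (reversed) to the result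
theorem pv_go_acc (s : List Char) : ∀ cur acc,
    PySem.Chars.split₀.go s cur acc = acc.reverse ++ PySem.Chars.split₀.go s cur [] := by
  induction s with
  | nil =>
      intro cur acc
      simp only [PySem.Chars.split₀.go]
      by_cases h : cur.isEmpty <;> simp [h]
  | cons c rest ih =>
      intro cur acc
      simp only [PySem.Chars.split₀.go]
      by_cases hc : PySem.Chars.isspace c
      · by_cases h : cur.isEmpty <;>
          simp [hc, h, ih [] acc, ih [] [cur.reverse], ih [] (cur.reverse :: acc)]
      · simp [hc, ih (c :: cur) acc]

-- splitting at an interior whitespace character splits the word list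
theorem pv_go_append_ws {c : Char} (hc : PySem.Chars.isspace c = true) (b : List Char) :
    ∀ (a cur : List Char) (acc : List (List Char)),
      PySem.Chars.split₀.go (a ++ c :: b) cur acc
        = PySem.Chars.split₀.go a cur acc ++ PySem.Chars.split₀.go b [] [] := by
  intro a
  induction a with
  | nil =>
      intro cur acc
      simp only [List.nil_append]
      rw [show PySem.Chars.split₀.go (c :: b) cur acc
            = if cur.isEmpty then PySem.Chars.split₀.go b [] acc
              else PySem.Chars.split₀.go b [] (cur.reverse :: acc) by
            simp [PySem.Chars.split₀.go, hc]]
      by_cases h : cur.isEmpty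
      · rw [pv_go_acc b [] acc]
        simp [PySem.Chars.split₀.go, h]
      · rw [pv_go_acc b [] (cur.reverse :: acc)]
        simp [PySem.Chars.split₀.go, h]
  | cons x a ih =>
      intro cur acc
      simp only [List.cons_append]
      simp only [PySem.Chars.split₀.go]
      by_cases hx : PySem.Chars.isspace x
      · by_cases h : cur.isEmpty <;> simp [hx, h, ih]
      · simp [hx, ih]

theorem pv_split₀_append {c : Char} (hc : PySem.Chars.isspace c = true) (a b : List Char) :
    PySem.Chars.split₀ (a ++ c :: b) = PySem.Chars.split₀ a ++ PySem.Chars.split₀ b := by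
  simp [PySem.Chars.split₀, pv_go_append_ws hc]

theorem pv_split₀_cons_ws {c : Char} (hc : PySem.Chars.isspace c = true) (r : List Char) :
    PySem.Chars.split₀ (c :: r) = PySem.Chars.split₀ r := by
  simp [PySem.Chars.split₀, PySem.Chars.split₀.go, hc]

-- every word produced by split₀ is nonempty and whitespace-free
def pvGood (w : List Char) : Prop := w ≠ [] ∧ ∀ ch ∈ w, PySem.Chars.isspace ch = false

theorem pv_go_good (s : List Char) : ∀ cur acc,
    (∀ w ∈ acc, pvGood w) → (∀ ch ∈ cur, PySem.Chars.isspace ch = false) →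
    ∀ w ∈ PySem.Chars.split₀.go s cur acc, pvGood w := by
  induction s with
  | nil =>
      intro cur acc hacc hcur w hw
      simp only [PySem.Chars.split₀.go] at hw
      by_cases h : cur.isEmpty
      · simp [h] at hw; exact hacc w (by simpa using hw)
      · simp [h] at hw
        rcases hw with hw | hw
        · exact hacc w hw
        · subst hw
          refine ⟨by simpa [List.isEmpty_iff] using h, ?_⟩
          intro ch hch; exact hcur ch (by simpa using hch)
  | cons c rest ih =>
      intro cur acc hacc hcur w hw
      simp only [PySem.Chars.split₀.go] at hw
      by_cases hc : PySem.Chars.isspace c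
      · by_cases h : cur.isEmpty
        · simp [hc, h] at hw
          exact ih [] acc hacc (by simp) w hw
        · simp [hc, h] at hw
          refine ih [] (cur.reverse :: acc) ?_ (by simp) w hw
          intro v hv
          rcases List.mem_cons.mp hv with hv | hv
          · subst hv
            refine ⟨by simpa [List.isEmpty_iff] using h, ?_⟩
            intro ch hch; exact hcur ch (by simpa using hch)
          · exact hacc v (by simpa using hv)
      · simp [hc] at hw
        refine ih (c :: cur) acc hacc ?_ w hw
        intro ch hch
        rcases List.mem_cons.mp hch with hch | hch
        · subst hch; simpa using hc
        · exact hcur ch hch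

theorem pv_split₀_good (s : List Char) : ∀ w ∈ PySem.Chars.split₀ s, pvGood w :=
  pv_go_good s [] [] (by simp) (by simp)

theorem pv_rstrip_eq_self (w : List Char) (h : ∀ ch ∈ w, PySem.Chars.isspace ch = false) :
    PySem.Chars.rstrip w = w := by
  simp only [PySem.Chars.rstrip]
  rw [pv_dropWhile_all_false _ _ (by intro x hx; exact h x (by simpa using hx))]
  simp

theorem pv_strip_eq_self (w : List Char) (h : ∀ ch ∈ w, PySem.Chars.isspace ch = false) :
    PySem.Chars.strip w = w := by
  simp only [PySem.Chars.strip, PySem.Chars.lstrip]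
  rw [pv_dropWhile_all_false _ _ h]
  exact pv_rstrip_eq_self w h

-- A's truthiness filter in _word_count keeps every word split₀ produces
theorem pv_filterA (s : String) :
    (PySem.Str.split₀ s).filter (fun w => !(PySem.Str.strip w == "")) = PySem.Str.split₀ s := by
  rw [List.filter_eq_self]
  intro w hw
  simp only [PySem.Str.split₀, List.mem_map] at hw
  obtain ⟨w', hw', rfl⟩ := hw
  obtain ⟨hne, hns⟩ := pv_split₀_good _ w' hw'
  have hstrip : PySem.Str.strip (String.ofList w') = String.ofList w' := by
    simp only [PySem.Str.strip, String.toList_ofList]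
    rw [pv_strip_eq_self w' hns]
  rw [hstrip]
  simp only [Bool.not_eq_eq_eq_not, Bool.not_true, beq_eq_false_iff_ne, ne_eq]
  intro hcontra
  apply hne
  have := congrArg String.toList hcontra
  simpa using this

theorem pv_wcA (s : String) : pvWordCountA s = ((PySem.Str.split₀ s).length : Int) := by
  unfold pvWordCountA
  split_ifs with h
  · subst h; simp [pv_filterA]
  · simp [pv_filterA]

set_option maxRecDepth 20000 in
theorem pv_filler_head : pvFiller.toList.head? = some '\n' := by rfl

set_option maxRecDepth 20000 in
theorem pv_fillerF : (PySem.Str.split₀ pvFiller).length = 35 := by rfl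

-- appending the filler adds exactly its 35 words
theorem pv_wc_cat_filler (t : String) :
    ((PySem.Str.split₀ (pvCat t pvFiller)).length : Int) = (PySem.Str.split₀ t).length + 35 := by
  have hh := pv_filler_head
  cases hF : pvFiller.toList with
  | nil => rw [hF] at hh; simp at hh
  | cons c r =>
      rw [hF] at hh
      simp only [List.head?_cons, Option.some.injEq] at hh
      have hc : PySem.Chars.isspace c = true := by rw [hh]; decide
      simp only [PySem.Str.split₀, pvCat, String.toList_ofList, List.length_map]
      rw [hF, pv_split₀_append hc, List.length_append]
      have h35 : (PySem.Chars.split₀ r).length = 35 := by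
        have h' := pv_fillerF
        simp only [PySem.Str.split₀, List.length_map] at h'
        rw [hF, pv_split₀_cons_ws hc] at h'
        exact h'
      rw [h35]; push_cast; ring

theorem pv_cat_repeat_succ (t : String) (q : Int) (hq : 0 ≤ q) :
    pvCat t (pvRepeat pvFiller (q + 1)) = pvCat (pvCat t pvFiller) (pvRepeat pvFiller q) := by
  have h1 : (q + 1).toNat = q.toNat + 1 := by omega
  simp [pvRepeat, pvCat, h1, List.replicate_succ]

theorem pv_cat_repeat_one (t : String) : pvCat t (pvRepeat pvFiller 1) = pvCat t pvFiller := by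
  simp [pvRepeat, pvCat]

theorem pv_loop_stop (f : Nat) (t : String) (mn : Int) (h : ¬ pvWordCountA t < mn) :
    pvLoopA f t mn = t := by
  cases f <;> simp [pvLoopA, h]

-- A's while loop, closed form: it appends exactly ⌈(min_words − wc)/35⌉ filler blocks
theorem pv_loop_run (mn : Int) : ∀ (f : Nat) (t : String),
    ((PySem.Str.split₀ t).length : Int) < mn →
    mn ≤ (PySem.Str.split₀ t).length + 35 * f →
    pvLoopA f t mn
      = pvCat t (pvRepeat pvFiller
          (-(PySem.Int.floordiv (-(mn - ((PySem.Str.split₀ t).length : Int))) 35))) := by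
  intro f
  induction f with
  | zero => intro t h1 h2; omega
  | succ f ih =>
      intro t h1 h2
      have hgo : pvWordCountA t < mn := by rw [pv_wcA]; exact h1
      rw [show pvLoopA (f+1) t mn = pvLoopA f (pvCat t pvFiller) mn by simp [pvLoopA, hgo]]
      set w : Int := ((PySem.Str.split₀ t).length : Int) with hw
      have hcat : ((PySem.Str.split₀ (pvCat t pvFiller)).length : Int) = w + 35 :=
        pv_wc_cat_filler t
      by_cases h2' : ((PySem.Str.split₀ (pvCat t pvFiller)).length : Int) < mn
      · rw [ih (pvCat t pvFiller) h2' (by rw [hcat]; omega)]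
        rw [hcat]
        set q : Int := -(PySem.Int.floordiv (-(mn - (w + 35))) 35) with hq
        have hbr : (q - 1) * 35 < mn - (w + 35) ∧ mn - (w + 35) ≤ q * 35 :=
          (PySem.Int.neg_floordiv_neg_eq_iff_of_pos (by norm_num)).mp hq.symm
        have hq0 : 0 ≤ q := by nlinarith [hbr.1, hbr.2, hcat, h2']
        have hsucc : -(PySem.Int.floordiv (-(mn - w)) 35) = q + 1 := by
          rw [PySem.Int.neg_floordiv_neg_eq_iff_of_pos (by norm_num : (0:Int) < 35)]
          constructor <;> nlinarith [hbr.1, hbr.2]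
        rw [hsucc, pv_cat_repeat_succ t q hq0]
      · rw [pv_loop_stop f (pvCat t pvFiller) mn (by rw [pv_wcA]; exact h2')]
        have hone : -(PySem.Int.floordiv (-(mn - w)) 35) = 1 := by
          rw [PySem.Int.neg_floordiv_neg_eq_iff_of_pos (by norm_num : (0:Int) < 35)]
          constructor <;> [nlinarith [h1]; nlinarith [hcat, h2']]
        rw [hone, pv_cat_repeat_one]

-- the whole padding phase, in B's form (the fuel min_words.toNat + 1 always reaches the guard)
theorem pv_pad (t : String) (mn : Int) :
    pvLoopA (mn.toNat + 1) t mn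
      = (if ((PySem.Str.split₀ t).length : Int) < mn then
          pvCat t (pvRepeat pvFiller
            (-(PySem.Int.floordiv (-(mn - ((PySem.Str.split₀ t).length : Int)))
                ((PySem.Str.split₀ pvFiller).length : Int))))
        else t) := by
  have hF : ((PySem.Str.split₀ pvFiller).length : Int) = 35 := by
    exact_mod_cast pv_fillerF
  rw [hF]
  by_cases h : ((PySem.Str.split₀ t).length : Int) < mn
  · rw [if_pos h]
    exact pv_loop_run mn (mn.toNat + 1) t h (by omega)
  · rw [if_neg h]
    exact pv_loop_stop _ _ _ (by rw [pv_wcA]; exact h)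

theorem pv_rstrip_append (x y : List Char) (h : PySem.Chars.rstrip y ≠ []) :
    PySem.Chars.rstrip (x ++ y) = x ++ PySem.Chars.rstrip y := by
  simp only [PySem.Chars.rstrip] at *
  rw [List.reverse_append, List.dropWhile_append]
  split_ifs with he
  · exfalso; apply h; rw [List.isEmpty_iff] at he; simp [he]
  · simp

theorem pv_join_ne_nil (q : List Char) (l : List (List Char)) (hq : q ≠ []) :
    PySem.Chars.join [' '] (q :: l) ≠ [] := by
  cases l with
  | nil => simpa [PySem.Chars.join, List.intercalate]
  | cons b m =>
      rw [PySem.Chars.join_cons_cons]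
      simp [hq]

theorem pv_rstrip_join_chars : ∀ (parts : List (List Char)), (∀ p ∈ parts, pvGood p) →
    PySem.Chars.rstrip (PySem.Chars.join [' '] parts) = PySem.Chars.join [' '] parts := by
  intro parts
  induction parts with
  | nil => intro _; simp [PySem.Chars.join, List.intercalate, PySem.Chars.rstrip]
  | cons p l ih =>
      intro h
      cases l with
      | nil =>
          simp only [PySem.Chars.join_singleton]
          exact pv_rstrip_eq_self p (h p (by simp)).2
      | cons q m =>
          rw [PySem.Chars.join_cons_cons]
          have hrest : PySem.Chars.rstrip (PySem.Chars.join [' '] (q :: m))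
              = PySem.Chars.join [' '] (q :: m) := ih (by intro x hx; exact h x (by simp [hx]))
          have hne : PySem.Chars.join [' '] (q :: m) ≠ [] :=
            pv_join_ne_nil q m (h q (by simp)).1
          rw [show p ++ [' '] ++ PySem.Chars.join [' '] (q :: m)
                = (p ++ [' ']) ++ PySem.Chars.join [' '] (q :: m) by simp,
              pv_rstrip_append _ _ (by rw [hrest]; exact hne), hrest]

-- the rstrip in A's truncation branch is a no-op: the joined words end in a non-space character
theorem pv_rstrip_join (ws : List String) (h : ∀ w ∈ ws, pvGood w.toList) :
    PySem.Str.rstrip (PySem.Str.join " " ws) = PySem.Str.join " " ws := by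
  simp only [PySem.Str.rstrip, PySem.Str.join, String.toList_ofList]
  rw [show (" " : String).toList = [' '] by rfl]
  rw [pv_rstrip_join_chars (ws.map String.toList)
      (by intro p hp; obtain ⟨w, hw, rfl⟩ := List.mem_map.mp hp; exact h w hw)]

-- every word of a split₀ result (hence of any slice of it) is good
theorem pv_slice_good (t : String) (b : Option Int) :
    ∀ w ∈ PySem.List.slice (PySem.Str.split₀ t) none b, pvGood w.toList := by
  intro w hw
  have hmem : w ∈ PySem.Str.split₀ t := PySem.List.mem_of_mem_slice _ _ _ hw
  simp only [PySem.Str.split₀, List.mem_map] at hmem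
  obtain ⟨w', hw', rfl⟩ := hmem
  rw [String.toList_ofList]
  exact pv_split₀_good _ w' hw'

-- ===== VERDICT (by name: the statement is the Claim_ definition above) =====
theorem fallback_longform_article_py_spec : Claim_equal_fallback_longform_article_py := by
  intro article min_words max_words _
  unfold Spec_fallback_longform_article_py
  unfold fallback_longform_article_py fallback_longform_article_py_alt
  rcases hp : pvFields article with ⟨headline, dek, summary, sectionLabel, source, base_body⟩
  dsimp only
  rw [PySem.List.foldl_append_singleton_eq_map]
  by_cases hs : source = "" <;>
    simp only [hs, not_true_eq_false, not_false_eq_true, if_true, if_false,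
      List.append_assoc, List.cons_append, List.nil_append] <;>
  · rw [pv_pad]
    set t2 := (if ((PySem.Str.split₀ (PySem.Str.join "\n\n" _)).length : Int) < min_words
        then _ else _) with ht2
    by_cases hgt : ((PySem.Str.split₀ t2).length : Int) > max_words
    · rw [if_pos hgt, if_pos hgt, pv_rstrip_join _ (pv_slice_good t2 (some max_words))]
    · rw [if_neg hgt, if_neg hgt]
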